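-- pv_equiv track=rewrite | github.com/songyi00/solve-algorithm | 2021.01/tree/boj11725.py | bfs
-- ===== SOURCE A (Python) =====
-- from collections import defaultdict,deque
--
-- def bfs(tree,root):
--     queue = deque()
--     queue.append(root)
--     visit = defaultdict(lambda : False)
--     parent = defaultdict(int)
--
--     while queue:
--         node = queue.popleft()
--         visit[node] = True
--         for n in tree[node]:
--             if not visit[n]:
--                 queue.append(n)
--                 parent[n]= node
--     return parent
-- ===== SOURCE B (Python) =====
-- from collections import defaultdict
--
-- def bfs(tree, root):
--     # Two-phase: collect (child, parent) assignment events as a flat list during a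
--     # level-synchronous traversal (plain-list frontiers, visited as a set), then
--     # build the defaultdict once from the event list at the end.
--     links = []
--     seen = set()
--     frontier = [root]
--     while frontier:
--         nxt = []
--         for node in frontier:
--             seen.add(node)
--             fresh = [n for n in tree[node] if n not in seen]
--             links.extend((n, node) for n in fresh)
--             nxt += fresh
--         frontier = nxt
--     parent = defaultdict(int)
--     for child, par in links:
--         parent[child] = par
--     return parent
-- ===== Notes on version B (the rewrite author's own statement) =====
-- stated objective: alternative
-- what changed: Replaces the deque-driven loop that mutates the parent dict in place with a two-phase design: a level-synchronous traversal over plain-list frontiers (visited as a set) that only records (child, parent) assignment events into a flat list, and a final pass that builds the defaultdict from those events.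
-- outside the precondition, e.g. on bfs({0: [1], 1: [], 2: [5]}, 0): A returns {1: 0}, B returns {1: 0}
import Mathlib
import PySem

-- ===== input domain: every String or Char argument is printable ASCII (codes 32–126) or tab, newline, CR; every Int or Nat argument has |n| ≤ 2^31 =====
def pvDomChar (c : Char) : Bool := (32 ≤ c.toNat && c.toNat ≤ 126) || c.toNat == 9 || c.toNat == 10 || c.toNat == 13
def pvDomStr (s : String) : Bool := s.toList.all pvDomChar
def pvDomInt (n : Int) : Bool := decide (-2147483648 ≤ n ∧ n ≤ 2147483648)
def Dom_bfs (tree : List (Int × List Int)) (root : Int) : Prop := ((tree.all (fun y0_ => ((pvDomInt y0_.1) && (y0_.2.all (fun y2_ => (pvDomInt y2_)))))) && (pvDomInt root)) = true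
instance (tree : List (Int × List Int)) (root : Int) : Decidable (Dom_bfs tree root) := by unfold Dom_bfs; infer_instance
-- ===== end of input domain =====

-- B is a two-phase alternative: level-synchronous traversal recording (child, parent)
-- events into a flat list, then one final pass building the dict (objective: alternative
-- decomposition, same cost; return value only — neither mutates its arguments).

-- ===== PORT A =====
-- fuel bounds the number of queue pops; each enqueue of n happens before n's first pop,
-- so total pops ≤ (Σ adjacency lengths)^(#keys) up to constants — the expression below dominates that.
def bfsFuelA (tree : List (Int × List Int)) : Nat :=
  (tree.foldl (fun a p => a + p.2.length) 0 + tree.length + 2) ^ (tree.length + 2)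

def bfsLoopA (tree : List (Int × List Int)) :
    Nat → List Int → PySem.Dict Int Bool → PySem.Dict Int Int → PySem.Dict Int Int
  | _, [], _, parent => parent
  | 0, _ :: _, _, parent => parent
  | fuel+1, node :: rest, visit, parent =>
    let visit' := visit.insert node true
    match (PySem.Dict.mk tree).get? node with
    | none => parent   -- Python raises KeyError here; Pre_bfs excludes it
    | some ns =>
      let st := ns.foldl
        (fun (st : List Int × PySem.Dict Int Int) n =>
          if visit'.getD n false then st else (st.1 ++ [n], st.2.insert n node))
        (rest, parent)
      bfsLoopA tree fuel st.1 visit' st.2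

def bfs (tree : List (Int × List Int)) (root : Int) : List (Int × Int) :=
  (bfsLoopA tree (bfsFuelA tree) [root] PySem.Dict.empty PySem.Dict.empty).items

-- ===== PORT B =====
def bfsFuelB (tree : List (Int × List Int)) : Nat :=
  ((tree.map (fun p => p.2.length)).sum + tree.length + 2) ^ (tree.length + 2)

-- outer while over frontier generations + inner for over the current frontier,
-- written as one recursion: (frontier, nxt) is the inner state; when the inner
-- loop finishes (rest = []) the next generation nxt becomes the frontier.
-- The loop only accumulates the flat event list `links`.
def bfsLoopB (tree : List (Int × List Int)) :
    Nat → List Int → List Int → PySem.Set Int → List (Int × Int) → List (Int × Int)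
  | _, [], _, _, links => links
  | 0, _ :: _, _, _, links => links
  | fuel+1, node :: rest, nxt, seen, links =>
    let seen' := PySem.Set.add seen node
    match (PySem.Dict.mk tree).get? node with
    | none => links   -- Python raises KeyError here; Pre_bfs excludes it
    | some ns =>
      let fresh := ns.filter (fun n => !(PySem.Set.contains seen' n))
      let links' := links ++ fresh.map (fun n => (n, node))
      match rest with
      | [] => bfsLoopB tree fuel (nxt ++ fresh) [] seen' links'
      | r :: rs => bfsLoopB tree fuel (r :: rs) (nxt ++ fresh) seen' links'

-- final pass of Source B: `for child, par in links: parent[child] = par`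
def bfs_alt (tree : List (Int × List Int)) (root : Int) : List (Int × Int) :=
  ((bfsLoopB tree (bfsFuelB tree) [root] [] PySem.Set.empty []).foldl
      (fun d cp => d.insert cp.1 cp.2) PySem.Dict.empty).items

-- ===== PRECONDITION & SPEC =====
-- Pre_bfs excludes inputs where Python A raises KeyError (root, or a node reached by the
-- traversal, absent from tree). "every listed neighbour is a key" is a closed-form
-- over-approximation: it also excludes some inputs where the missing neighbour is
-- unreachable and A returns normally (see claim cites); both programs agree there too.
def Pre_bfs (tree : List (Int × List Int)) (root : Int) : Prop :=
  (PySem.Dict.mk tree).contains root = true ∧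
  ∀ p ∈ tree, ∀ n ∈ p.2, (PySem.Dict.mk tree).contains n = true
instance (tree : List (Int × List Int)) (root : Int) : Decidable (Pre_bfs tree root) := by
  unfold Pre_bfs; infer_instance

def pvWitness_bfs : (List (Int × List Int)) × Int :=
  ([(0, [1, 2]), (1, [0, 3]), (2, [0]), (3, [1])], 0)

def Spec_bfs (tree : List (Int × List Int)) (root : Int) (out : List (Int × Int)) : Prop := out = bfs_alt tree root
instance (tree : List (Int × List Int)) (root : Int) (out : List (Int × Int)) : Decidable (Spec_bfs tree root out) := by unfold Spec_bfs; infer_instance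

-- ===== CLAIM (what is proved, stated in full; the proofs are below) =====
def Claim_equal_bfs : Prop := ∀ (tree : List (Int × List Int)) (root : Int), Dom_bfs tree root → Pre_bfs tree root → Spec_bfs tree root (bfs tree root)

-- ===== LEMMAS AND PROOFS =====

-- the two fuel expressions agree (same bound, written as map-sum vs foldl)
lemma bfsFuel_aux : ∀ (t : List (Int × List Int)) (a : Nat),
    t.foldl (fun a p => a + p.2.length) a = a + (t.map (fun p => p.2.length)).sum := by
  intro t
  induction t with
  | nil => intro a; simp
  | cons p t ih => intro a; simp [List.foldl_cons, ih]; omega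

lemma bfsFuel_eq (tree : List (Int × List Int)) : bfsFuelB tree = bfsFuelA tree := by
  unfold bfsFuelA bfsFuelB
  rw [bfsFuel_aux]
  simp

-- the dict that B's final pass builds from an event list
def mkD (l : List (Int × Int)) : PySem.Dict Int Int :=
  l.foldl (fun d cp => d.insert cp.1 cp.2) PySem.Dict.empty

lemma mkD_append (l m : List (Int × Int)) :
    mkD (l ++ m) = m.foldl (fun d cp => d.insert cp.1 cp.2) (mkD l) := by
  simp [mkD, List.foldl_append]

-- A's inner neighbour scan (queue append + parent insert under a fixed test) equals
-- "filter, then append the fresh nodes / record their events" — the shape B uses.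
lemma bfs_scan_eq (node : Int) (c : Int → Bool) :
    ∀ (ns q0 : List Int) (links : List (Int × Int)),
    ns.foldl (fun (st : List Int × PySem.Dict Int Int) n =>
        if c n then st else (st.1 ++ [n], st.2.insert n node)) (q0, mkD links)
    = (q0 ++ ns.filter (fun n => !c n),
       mkD (links ++ (ns.filter (fun n => !c n)).map (fun n => (n, node)))) := by
  intro ns
  induction ns with
  | nil => intro q0 links; simp [List.foldl, List.filter]
  | cons n ns ih =>
    intro q0 links
    by_cases h : c n = true
    · simp [List.foldl, List.filter, h, ih]
    · simp only [Bool.not_eq_true] at h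
      have hstep : (mkD links).insert n node = mkD (links ++ [(n, node)]) := by
        simp [mkD_append]
      simp [List.foldl, List.filter, h, hstep, ih]

lemma bfs_visit_add (visit : PySem.Dict Int Bool) (sv : PySem.Set Int) (node : Int)
    (hv : ∀ n, visit.getD n false = PySem.Set.contains sv n) :
    ∀ n, (visit.insert node true).getD n false = PySem.Set.contains (PySem.Set.add sv node) n := by
  intro n
  apply Bool.eq_iff_iff.mpr
  have h2 : visit.getD n false = true ↔ n ∈ sv := by rw [hv n, PySem.Set.contains_iff]
  by_cases h : n = node <;>
    simp [PySem.Dict.getD_insert, PySem.Set.mem_add, h, h2]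

-- simulation: A's queue is B's (frontier ++ nxt), A's parent dict is the dict built
-- from B's event list so far; B keeps nxt empty whenever frontier is.
lemma bfs_sim (tree : List (Int × List Int)) :
    ∀ (fuel : Nat) (frontier nxt : List Int) (visit : PySem.Dict Int Bool)
      (sv : PySem.Set Int) (links : List (Int × Int)),
    (∀ n, visit.getD n false = PySem.Set.contains sv n) →
    (frontier = [] → nxt = []) →
    bfsLoopA tree fuel (frontier ++ nxt) visit (mkD links)
      = mkD (bfsLoopB tree fuel frontier nxt sv links) := by
  intro fuel
  induction fuel with
  | zero =>
    intro frontier nxt visit sv links _ hnil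
    cases frontier with
    | nil => simp [hnil rfl, bfsLoopA, bfsLoopB]
    | cons a l => simp [bfsLoopA, bfsLoopB]
  | succ f ih =>
    intro frontier nxt visit sv links hv hnil
    cases frontier with
    | nil => simp [hnil rfl, bfsLoopA, bfsLoopB]
    | cons node rest =>
      have hv' := bfs_visit_add visit sv node hv
      show bfsLoopA tree (f+1) (node :: (rest ++ nxt)) visit (mkD links) = _
      rw [bfsLoopA, bfsLoopB]
      cases hlook : (PySem.Dict.mk tree).get? node with
      | none => simp
      | some ns =>
        simp only []
        rw [bfs_scan_eq node (fun n => (visit.insert node true).getD n false) ns (rest ++ nxt) links]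
        have hfil : ns.filter (fun n => !(visit.insert node true).getD n false)
            = ns.filter (fun n => !(PySem.Set.contains (PySem.Set.add sv node) n)) := by
          apply List.filter_congr; intro x _; rw [hv']
        rw [hfil]
        set fresh := ns.filter (fun n => !(PySem.Set.contains (PySem.Set.add sv node) n)) with hfresh
        cases rest with
        | nil =>
          have := ih (nxt ++ fresh) [] (visit.insert node true) (PySem.Set.add sv node)
            (links ++ fresh.map (fun n => (n, node))) hv' (by intro h; rfl)
          simpa using this
        | cons r rs =>
          have := ih (r :: rs) (nxt ++ fresh) (visit.insert node true) (PySem.Set.add sv node)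
            (links ++ fresh.map (fun n => (n, node))) hv' (by intro h; cases h)
          simpa using this

-- ===== VERDICT (by name: the statement is the Claim_ definition above) =====
theorem bfs_spec : Claim_equal_bfs := by
  intro tree root _ _
  unfold Spec_bfs bfs bfs_alt
  rw [bfsFuel_eq]
  unfold bfsFuelA
  have := bfs_sim tree ((tree.foldl (fun a p => a + p.2.length) 0 + tree.length + 2) ^ (tree.length + 2))
    [root] [] PySem.Dict.empty PySem.Set.empty []
    (by intro n; simp [PySem.Dict.getD_empty, PySem.Set.empty]) (by intro h; cases h)
  simp only [List.append_nil] at this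
  rw [show (PySem.Dict.empty : PySem.Dict Int Int) = mkD [] from rfl, this, mkD] <;> rfl
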